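-- pv_equiv track=rewrite | github.com/mberjans/ai_coding_automated_setup_augmentode | src/prompting/summarizer.py | find_sentence_end
-- ===== SOURCE A (Python) =====
-- def is_sentence_ender(char: str) -> bool:
--     """Check if a character typically ends a sentence."""
--     return char in {'.', '!', '?'}
--
-- def find_sentence_end(text: str, start_pos: int) -> int:
--     """Find the end position of a sentence starting at start_pos."""
--     text_length = len(text)
--     if start_pos >= text_length:
--         return text_length
--
--     i = start_pos
--     while i < text_length:
--         if is_sentence_ender(text[i]):
--             # Look ahead for end of sentence
--             j = i + 1
--             while j < text_length and text[j].isspace():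
--                 j += 1
--
--             # If we've reached the end or found a capital letter, it's likely a sentence end
--             if j >= text_length or text[j].isupper():
--                 return j
--         i += 1
--
--     return text_length
-- ===== SOURCE B (Python) =====
-- def find_sentence_end(text, start_pos):
--     """Find the end position of a sentence starting at start_pos."""
--     n = len(text)
--     armed = False  # an ender was seen and only whitespace since
--     for k in range(start_pos, n):
--         c = text[k]
--         if armed:
--             if c.isspace():
--                 continue
--             if c.isupper():
--                 return k
--         armed = c in '.!?'
--     return n
-- ===== Notes on version B (the rewrite author's own statement) =====
-- stated objective: faster
-- what changed: Replaces A's scan-with-lookahead (outer index loop plus an inner whitespace re-scan after every sentence ender) by a single forward pass driven by a one-bit state machine ('armed' = an ender was seen and only whitespace since), with no inner loop and less per-character work.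
import Mathlib
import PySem

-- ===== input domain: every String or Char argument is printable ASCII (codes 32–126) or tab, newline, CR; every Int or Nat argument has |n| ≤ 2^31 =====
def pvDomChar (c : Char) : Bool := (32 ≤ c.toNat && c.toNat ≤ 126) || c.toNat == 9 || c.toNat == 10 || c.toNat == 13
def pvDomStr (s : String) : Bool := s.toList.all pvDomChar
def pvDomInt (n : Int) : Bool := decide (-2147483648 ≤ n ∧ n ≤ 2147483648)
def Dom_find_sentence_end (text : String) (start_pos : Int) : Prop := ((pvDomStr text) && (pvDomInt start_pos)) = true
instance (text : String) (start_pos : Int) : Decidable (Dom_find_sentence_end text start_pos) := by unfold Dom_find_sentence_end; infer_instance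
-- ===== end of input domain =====

-- B replaces A's outer index loop with an inner whitespace lookahead re-scan by a single
-- forward pass driven by a one-bit 'armed' state; same cost class, different structure.

-- ===== PORT A =====

-- is_sentence_ender(char): char in {'.', '!', '?'}  (always called on a single character)
def fseIsEnder (c : Char) : Bool := c == '.' || c == '!' || c == '?'

-- inner loop: while j < text_length and text[j].isspace(): j += 1
-- text[j] is PySem.List.pyGet? (Python indexing, negative wraps); inside Pre_ every read is
-- in range, so the .getD ' ' default is never the value used.
def fseSkipWs (cs : List Char) (j : Int) : Int :=
  if _h : j < (cs.length : Int) then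
    if PySem.Chars.isspace ((PySem.List.pyGet? cs j).getD ' ') then fseSkipWs cs (j + 1) else j
  else j
termination_by ((cs.length : Int) - j).toNat
decreasing_by omega

-- outer loop: while i < text_length: …
def fseLoopA (cs : List Char) (i : Int) : Int :=
  if _h : i < (cs.length : Int) then
    if fseIsEnder ((PySem.List.pyGet? cs i).getD ' ') then
      let j := fseSkipWs cs (i + 1)
      if (cs.length : Int) ≤ j then j
      else if PySem.Chars.isupper ((PySem.List.pyGet? cs j).getD ' ') then j
      else fseLoopA cs (i + 1)
    else fseLoopA cs (i + 1)
  else (cs.length : Int)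
termination_by ((cs.length : Int) - i).toNat
decreasing_by all_goals omega

def find_sentence_end (text : String) (start_pos : Int) : Int :=
  let text_length : Int := PySem.Str.len text
  if start_pos ≥ text_length then text_length
  else fseLoopA text.toList start_pos

-- ===== PORT B =====

-- for k in range(start_pos, n): one pass, state bit 'armed'; 'c in ".!?"' on the single
-- character c is the three-way equality test.
def fseLoopB (cs : List Char) (k : Int) (armed : Bool) : Int :=
  if _h : k < (cs.length : Int) then
    let c := (PySem.List.pyGet? cs k).getD ' '
    if armed && PySem.Chars.isspace c then fseLoopB cs (k + 1) armed
    else if armed && PySem.Chars.isupper c then k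
    else fseLoopB cs (k + 1) (c == '.' || c == '!' || c == '?')
  else (cs.length : Int)
termination_by ((cs.length : Int) - k).toNat
decreasing_by all_goals omega

def find_sentence_end_alt (text : String) (start_pos : Int) : Int :=
  fseLoopB text.toList start_pos false

-- ===== PRECONDITION & SPEC =====
-- Pre_ excludes exactly the inputs where the Python A raises IndexError
-- (start_pos < -len(text) with the loop entered); A returns on every input Pre_ admits.
def Pre_find_sentence_end (text : String) (start_pos : Int) : Prop :=
  -(text.toList.length : Int) ≤ start_pos
instance (text : String) (start_pos : Int) : Decidable (Pre_find_sentence_end text start_pos) := by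
  unfold Pre_find_sentence_end; infer_instance

def pvWitness_find_sentence_end : String × Int := ("Hi. There", 0)

def Spec_find_sentence_end (text : String) (start_pos : Int) (out : Int) : Prop := out = find_sentence_end_alt text start_pos
instance (text : String) (start_pos : Int) (out : Int) : Decidable (Spec_find_sentence_end text start_pos out) := by unfold Spec_find_sentence_end; infer_instance

-- ===== CLAIM (what is proved, stated in full; the proofs are below) =====
def Claim_equal_find_sentence_end : Prop := ∀ (text : String) (start_pos : Int), Dom_find_sentence_end text start_pos → Pre_find_sentence_end text start_pos → Spec_find_sentence_end text start_pos (find_sentence_end text start_pos)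

-- ===== LEMMAS AND PROOFS =====

-- a whitespace character is never a sentence ender
theorem fse_ws_not_ender (c : Char) (h : PySem.Chars.isspace c = true) : fseIsEnder c = false := by
  unfold fseIsEnder
  simp only [Bool.or_eq_false_iff, beq_eq_false_iff_ne]
  refine ⟨⟨?_, ?_⟩, ?_⟩ <;> rintro rfl <;> exact absurd h (by decide)

-- A's outer loop steps over a non-ender character
theorem fseLoopA_step (cs : List Char) (i : Int) (hi : i < (cs.length : Int))
    (hne : fseIsEnder ((PySem.List.pyGet? cs i).getD ' ') = false) :
    fseLoopA cs i = fseLoopA cs (i + 1) := by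
  rw [fseLoopA, dif_pos hi, if_neg (by simp [hne])]

-- A's outer loop is unchanged by skipping a whitespace run
theorem fseLoopA_skip (cs : List Char) (i : Int) :
    fseLoopA cs i = fseLoopA cs (fseSkipWs cs i) := by
  have H : ∀ (m : Nat) (i : Int), ((cs.length : Int) - i).toNat ≤ m →
      fseLoopA cs i = fseLoopA cs (fseSkipWs cs i) := by
    intro m
    induction m with
    | zero =>
      intro i hm
      have hi : ¬ i < (cs.length : Int) := by omega
      rw [fseSkipWs, dif_neg hi]
    | succ m ih =>
      intro i hm
      by_cases hi : i < (cs.length : Int)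
      · by_cases hs : PySem.Chars.isspace ((PySem.List.pyGet? cs i).getD ' ') = true
        · rw [fseSkipWs, dif_pos hi, if_pos hs,
            fseLoopA_step cs i hi (fse_ws_not_ender _ hs)]
          exact ih (i + 1) (by omega)
        · rw [fseSkipWs, dif_pos hi, if_neg hs]
      · rw [fseSkipWs, dif_neg hi]
  exact H ((cs.length : Int) - i).toNat i le_rfl

-- main invariant: B's one-pass loop computes A's loop; when 'armed', it computes the value
-- A's pending lookahead-from-i check would produce
-- main invariant: B's one-pass loop computes A's loop; when 'armed', it computes the value
-- A's pending lookahead-from-i check would produce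
theorem fse_main (cs : List Char) (m : Nat) :
    ∀ (i : Int) (armed : Bool), ((cs.length : Int) - i).toNat ≤ m → i ≤ (cs.length : Int) →
    fseLoopB cs i armed =
      (if armed then
        (if (cs.length : Int) ≤ fseSkipWs cs i then fseSkipWs cs i
         else if PySem.Chars.isupper ((PySem.List.pyGet? cs (fseSkipWs cs i)).getD ' ') then fseSkipWs cs i
         else fseLoopA cs (fseSkipWs cs i))
       else fseLoopA cs i) := by
  induction m with
  | zero =>
    intro i armed hm hin
    have hi : ¬ i < (cs.length : Int) := by omega
    have hieq : i = (cs.length : Int) := by omega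
    rw [fseLoopB, dif_neg hi]
    cases armed
    · rw [if_neg Bool.false_ne_true, fseLoopA, dif_neg hi]
    · rw [if_pos rfl, fseSkipWs, dif_neg hi, if_pos (by omega : (cs.length : Int) ≤ i)]
      omega
  | succ m ih =>
    intro i armed hm hin
    by_cases hi : i < (cs.length : Int)
    · have hender : fseIsEnder ((PySem.List.pyGet? cs i).getD ' ')
          = (((PySem.List.pyGet? cs i).getD ' ' == '.') || ((PySem.List.pyGet? cs i).getD ' ' == '!')
            || ((PySem.List.pyGet? cs i).getD ' ' == '?')) := rfl
      have hkey : fseLoopB cs (i + 1)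
          (((PySem.List.pyGet? cs i).getD ' ' == '.') || ((PySem.List.pyGet? cs i).getD ' ' == '!')
            || ((PySem.List.pyGet? cs i).getD ' ' == '?')) = fseLoopA cs i := by
        have hKB := ih (i + 1) (fseIsEnder ((PySem.List.pyGet? cs i).getD ' ')) (by omega) (by omega)
        by_cases he : fseIsEnder ((PySem.List.pyGet? cs i).getD ' ') = true
        · rw [if_pos he] at hKB
          rw [he] at hKB
          rw [← hender, he]
          rw [fseLoopA, dif_pos hi, if_pos he]
          simp only []
          rw [fseLoopA_skip cs (i + 1)]
          exact hKB
        · have he' : fseIsEnder ((PySem.List.pyGet? cs i).getD ' ') = false := by simpa using he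
          rw [if_neg he] at hKB
          rw [he'] at hKB
          rw [← hender, he']
          rw [fseLoopA_step cs i hi he']
          exact hKB
      cases armed
      · rw [if_neg Bool.false_ne_true, fseLoopB, dif_pos hi]
        rw [if_neg (by simp), if_neg (by simp)]
        exact hkey
      · rw [if_pos rfl]
        by_cases hs : PySem.Chars.isspace ((PySem.List.pyGet? cs i).getD ' ') = true
        · rw [fseLoopB, dif_pos hi, if_pos (by simp [hs])]
          rw [fseSkipWs, dif_pos hi, if_pos hs]
          simpa using ih (i + 1) true (by omega) (by omega)
        · have hs' : PySem.Chars.isspace ((PySem.List.pyGet? cs i).getD ' ') = false := by simpa using hs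
          rw [fseSkipWs, dif_pos hi, if_neg hs]
          have hni : ¬ (cs.length : Int) ≤ i := by omega
          rw [if_neg hni]
          by_cases hu : PySem.Chars.isupper ((PySem.List.pyGet? cs i).getD ' ') = true
          · rw [if_pos hu, fseLoopB, dif_pos hi]
            rw [if_neg (by simp [hs']), if_pos (by simp [hu])]
          · have hu' : PySem.Chars.isupper ((PySem.List.pyGet? cs i).getD ' ') = false := by simpa using hu
            rw [if_neg hu, fseLoopB, dif_pos hi]
            rw [if_neg (by simp [hs']), if_neg (by simp [hu'])]
            exact hkey
    · have hieq : i = (cs.length : Int) := by omega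
      rw [fseLoopB, dif_neg hi]
      cases armed
      · rw [if_neg Bool.false_ne_true, fseLoopA, dif_neg hi]
      · rw [if_pos rfl, fseSkipWs, dif_neg hi, if_pos (by omega : (cs.length : Int) ≤ i)]
        omega

-- ===== VERDICT (by name: the statement is the Claim_ definition above) =====
theorem find_sentence_end_spec : Claim_equal_find_sentence_end := by
  intro text start_pos _hdom _hpre
  unfold Spec_find_sentence_end find_sentence_end find_sentence_end_alt
  have hlen : PySem.Str.len text = (text.toList.length : Int) := by
    simp [PySem.Str.len]
  simp only [hlen]
  by_cases hge : start_pos ≥ (text.toList.length : Int)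
  · rw [if_pos hge, fseLoopB, dif_neg (by omega)]
  · rw [if_neg hge]
    rw [fse_main text.toList ((text.toList.length : Int) - start_pos).toNat start_pos false le_rfl (by omega)]
    rw [if_neg Bool.false_ne_true]
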